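-- pv_equiv track=rewrite | github.com/v-saigal/ETL-Pipeline | src/ETL/load-size-unique.py | get_unique_size
-- ===== SOURCE A (Python) =====
-- def chunks(lst, n): #get the first order
--     for i in range(0, len(lst), n):
--         yield lst[i:i + n]
--
-- def get_unique_size(data):  #dictionary
--
--     size_list = []
--
--     for x in data:  #split by comma and dash
--         item_list = x['basket'].split(',')
--
--         for n in chunks(item_list,3): #run through each item
--             # each = n.split('-')
--             # size_list.append(each[0].strip().split(' ')[0]) #first element in the item
--             size_list.append(n[0])
--     unique_size = set(size_list) #makes unique size table
--     return unique_size
-- ===== SOURCE B (Python) =====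
-- def get_unique_size(data):
--     return {s for x in data for s in x['basket'].split(',')[::3]}
-- ===== Notes on version B (the rewrite author's own statement) =====
-- stated objective: idiomatic
-- what changed: Replaces the chunk-generator decomposition (build 3-element sublists, take each sublist's head, append to a list, then set()) with a single set comprehension over a stride-3 slice split(',')[::3] of each basket.
import Mathlib
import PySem

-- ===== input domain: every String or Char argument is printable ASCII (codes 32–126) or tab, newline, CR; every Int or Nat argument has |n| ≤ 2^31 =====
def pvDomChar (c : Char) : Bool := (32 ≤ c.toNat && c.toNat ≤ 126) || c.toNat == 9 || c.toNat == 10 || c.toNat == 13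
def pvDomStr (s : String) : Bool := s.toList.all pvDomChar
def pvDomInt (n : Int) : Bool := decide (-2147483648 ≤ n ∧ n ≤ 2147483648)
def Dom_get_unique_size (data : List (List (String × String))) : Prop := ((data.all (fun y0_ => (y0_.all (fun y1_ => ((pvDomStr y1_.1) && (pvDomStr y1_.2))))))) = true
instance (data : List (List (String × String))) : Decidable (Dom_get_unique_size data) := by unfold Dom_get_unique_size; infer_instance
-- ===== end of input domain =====

-- B replaces A's chunk-generator decomposition (3-element sublists, head of each, list then set)
-- with a set comprehension over a stride-3 slice of the split basket; same cost, more idiomatic.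

-- ===== PORT A =====
-- literal port of A: build size_list by appending n[0] for each 3-chunk of the split basket, then set(size_list)
def get_unique_size (data : List (List (String × String))) : List String :=
  let size_list := data.foldl (fun size_list x =>
    let item_list := (PySem.Str.split? (((PySem.Dict.mk x).get? "basket").getD "") ",").getD []
    (PySem.List.pyRange 0 (PySem.List.len item_list) 3).foldl
      (fun acc i =>
        acc ++ [PySem.List.pyGetD (PySem.List.slice item_list (some i) (some (i + 3))) 0 ""])
      size_list) []
  PySem.Set.ofList size_list

-- ===== PORT B =====
-- literal port of B: {s for x in data for s in x['basket'].split(',')[::3]}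
def get_unique_size_alt (data : List (List (String × String))) : List String :=
  PySem.Set.ofList (data.flatMap (fun x =>
    (PySem.List.slice?
      ((PySem.Str.split? (((PySem.Dict.mk x).get? "basket").getD "") ",").getD [])
      none none 3).getD []))

-- ===== PRECONDITION & SPEC =====
-- Pre_ excludes rows without a 'basket' key, on which the Python A raises KeyError (and so does B).
def Pre_get_unique_size (data : List (List (String × String))) : Prop :=
  ∀ x ∈ data, (((PySem.Dict.mk x).get? "basket").isSome : Prop)
instance (data : List (List (String × String))) : Decidable (Pre_get_unique_size data) := by unfold Pre_get_unique_size; infer_instance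
def pvWitness_get_unique_size : (List (List (String × String))) := [[("basket", "s,red-1,2,m,blue-3,4")]]
def Spec_get_unique_size (data : List (List (String × String))) (out : List String) : Prop := out = get_unique_size_alt data
instance (data : List (List (String × String))) (out : List String) : Decidable (Spec_get_unique_size data out) := by unfold Spec_get_unique_size; infer_instance

-- ===== CLAIM (what is proved, stated in full; the proofs are below) =====
def Claim_equal_get_unique_size : Prop := ∀ (data : List (List (String × String))), Dom_get_unique_size data → Pre_get_unique_size data → Spec_get_unique_size data (get_unique_size data)

-- ===== LEMMAS AND PROOFS =====

-- A's inner chunk loop over one token list equals B's stride-3 slice of that list.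
theorem chunk_firsts_eq_stride (lst : List String) (acc : List String) :
    (PySem.List.pyRange 0 (PySem.List.len lst) 3).foldl
      (fun acc i =>
        acc ++ [PySem.List.pyGetD (PySem.List.slice lst (some i) (some (i + 3))) 0 ""])
      acc
    = acc ++ (PySem.List.slice? lst none none 3).getD [] := by
  rw [PySem.List.len_eq, PySem.List.pyRange_of_pos 0 (lst.length : Int) (by decide),
      List.foldl_map, PySem.List.foldl_append_singleton_eq_map]
  congr 1
  simp only [PySem.List.slice?, PySem.List.sliceIndices]
  norm_num
  have hbound : ∀ k ∈ List.range (if 0 < lst.length then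
      (((lst.length : Int) + 3 - 1) / 3).toNat else 0), 3 * k < lst.length := by
    intro k hk
    rw [List.mem_range] at hk
    split at hk <;> omega
  rw [List.filterMap_congr (g := some ∘ fun k => lst.getD (3 * k) "")
      (by
        intro k hk
        have h3k := hbound k hk
        simp only [Function.comp]
        have : ((3 : Int) * (k : Int)).toNat = 3 * k := by omega
        rw [this, List.getD_eq_getElem?_getD, List.getElem?_eq_getElem h3k]
        rfl),
      List.filterMap_eq_map]
  refine List.map_congr_left ?_
  intro k hk
  have h3k := hbound k hk
  have hc1 : (3 : Int) * (k : Int) = ((3 * k : Nat) : Int) := by push_cast; ring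
  have hc2 : ((3 * k : Nat) : Int) + 3 = ((3 * k : Nat) : Int) + ((3 : Nat) : Int) := by norm_num
  rw [hc1, hc2, PySem.List.slice_natCast_add, PySem.List.pyGetD_zero]
  rw [List.getD_eq_getElem?_getD, List.getD_eq_getElem?_getD, List.getElem?_take,
      if_pos (by omega : 0 < 3), List.getElem?_drop, Nat.add_zero]

-- A's outer collecting loop equals B's flatMap.
theorem collect_eq_flatMap (data : List (List (String × String))) (acc : List String) :
    data.foldl (fun size_list x =>
      let item_list := (PySem.Str.split? (((PySem.Dict.mk x).get? "basket").getD "") ",").getD []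
      (PySem.List.pyRange 0 (PySem.List.len item_list) 3).foldl
        (fun acc i =>
          acc ++ [PySem.List.pyGetD (PySem.List.slice item_list (some i) (some (i + 3))) 0 ""])
        size_list) acc
    = acc ++ data.flatMap (fun x =>
        (PySem.List.slice?
          ((PySem.Str.split? (((PySem.Dict.mk x).get? "basket").getD "") ",").getD [])
          none none 3).getD []) := by
  induction data generalizing acc with
  | nil => simp
  | cons x xs ih =>
    simp only [List.foldl_cons, List.flatMap_cons]
    rw [ih, chunk_firsts_eq_stride]
    simp [List.append_assoc]

-- ===== VERDICT (by name: the statement is the Claim_ definition above) =====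
theorem get_unique_size_spec : Claim_equal_get_unique_size := by
  intro data _ _
  unfold Spec_get_unique_size get_unique_size get_unique_size_alt
  rw [collect_eq_flatMap]
  rfl
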